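-- pv_equiv track=rewrite | github.com/EdwardZehuaZhang/3d-printing-monorepo | rhino8-internal-wire/Libraries/wire_router/core.py | _build_bottom_up_xy_lanes
-- ===== SOURCE A (Python) =====
-- from typing import Dict, Iterable, Iterator, List, Optional, Sequence, Set, Tuple
--
-- GridIndex = Tuple[int, int, int]
--
-- def _contiguous_x_segments(row_cells: Sequence[GridIndex]) -> List[List[GridIndex]]:
--     if not row_cells:
--         return []
--
--     ordered = sorted(row_cells, key=lambda cell: cell[0])
--     segments: List[List[GridIndex]] = []
--     current: List[GridIndex] = [ordered[0]]
--     for cell in ordered[1:]: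
--         if cell[0] == current[-1][0] + 1:
--             current.append(cell)
--             continue
--         segments.append(current)
--         current = [cell]
--     segments.append(current)
--     return segments
--
-- def _build_bottom_up_xy_lanes(
--     coiling_cells: Set[GridIndex],
--     row_spacing: int,
-- ) -> List[List[GridIndex]]:
--     if not coiling_cells:
--         return []
--
--     lanes: List[List[GridIndex]] = []
--     reverse_x = False
--     z_levels = sorted({cell[2] for cell in coiling_cells})
--     for z in z_levels:
--         layer = [cell for cell in coiling_cells if cell[2] == z]
--         rows_by_y: Dict[int, List[GridIndex]] = {}
--         for cell in layer:
--             rows_by_y.setdefault(cell[1], []).append(cell)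
--
--         selected_rows: List[int] = []
--         for y in sorted(rows_by_y.keys()):
--             if not selected_rows or abs(y - selected_rows[-1]) >= row_spacing:
--                 selected_rows.append(y)
--
--         for y in selected_rows:
--             row_segments = _contiguous_x_segments(rows_by_y[y])
--             if not row_segments:
--                 continue
--
--             if reverse_x:
--                 iter_segments = list(reversed(row_segments))
--             else:
--                 iter_segments = row_segments
--
--             for segment in iter_segments:
--                 if len(segment) < 2:
--                     continue
--                 lane = list(reversed(segment)) if reverse_x else segment
--                 lanes.append(lane)
--                 reverse_x = not reverse_x
--
--     return lanes
-- ===== SOURCE B (Python) =====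
-- def _build_bottom_up_xy_lanes(coiling_cells, row_spacing):
--     by_z = {}
--     for cell in coiling_cells:
--         by_z.setdefault(cell[2], []).append(cell)
--
--     lanes = []
--     reverse_x = False
--     for z in sorted(by_z):
--         by_y = {}
--         for cell in by_z[z]:
--             by_y.setdefault(cell[1], []).append(cell)
--
--         last_y = None
--         for y in sorted(by_y):
--             if last_y is not None and abs(y - last_y) < row_spacing:
--                 continue
--             last_y = y
--
--             ordered = sorted(by_y[y], key=lambda c: c[0])
--             runs = []
--             rest = ordered
--             while rest:
--                 run, rest = [rest[0]], rest[1:]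
--                 while rest and rest[0][0] == run[-1][0] + 1:
--                     run.append(rest[0])
--                     rest = rest[1:]
--                 if len(run) >= 2:
--                     runs.append(run)
--
--             if reverse_x:
--                 runs.reverse()
--             for run in runs:
--                 lanes.append(run[::-1] if reverse_x else run)
--                 reverse_x = not reverse_x
--     return lanes
-- ===== Notes on version B (the rewrite author's own statement) =====
-- stated objective: alternative
-- what changed: B buckets all cells by z in one dict pass instead of re-scanning the whole cell set once per z-level (intended as faster, measured only 1.29x at the largest size), fuses the row-selection list and the per-row emission into one loop carrying last_y, and extracts only the length>=2 contiguous runs directly instead of building all segments and filtering them while emitting.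
import Mathlib
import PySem

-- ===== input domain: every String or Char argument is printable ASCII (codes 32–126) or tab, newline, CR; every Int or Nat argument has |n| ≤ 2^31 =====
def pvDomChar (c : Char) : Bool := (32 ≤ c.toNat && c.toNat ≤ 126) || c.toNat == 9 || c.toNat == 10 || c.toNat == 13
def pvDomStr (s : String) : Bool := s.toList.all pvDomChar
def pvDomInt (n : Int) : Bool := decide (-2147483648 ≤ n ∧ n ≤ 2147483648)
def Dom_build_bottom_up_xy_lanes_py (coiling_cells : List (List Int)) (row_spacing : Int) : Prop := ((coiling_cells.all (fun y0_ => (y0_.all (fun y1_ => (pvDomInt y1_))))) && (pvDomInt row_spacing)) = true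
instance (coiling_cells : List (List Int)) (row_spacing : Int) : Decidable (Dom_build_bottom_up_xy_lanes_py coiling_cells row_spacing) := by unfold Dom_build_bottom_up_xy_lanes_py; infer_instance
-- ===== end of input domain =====

-- B replaces A's per-z rescan of the whole cell set by one grouping pass, fuses row
-- selection with emission, and extracts only the length-≥2 contiguous runs (objective: alternative).
-- cell[i], exact on Pre_ (every cell has ≥ 3 coordinates, indices used are 0,1,2)
def pvIdx (c : List Int) (i : Int) : Int := (PySem.List.pyGet? c i).getD 0

-- ===== PORT A =====
-- loop of _contiguous_x_segments: current/segments accumulators, Python append = ++ [·]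
def pvSegLoop (rest : List (List Int)) (segments : List (List (List Int)))
    (current : List (List Int)) : List (List (List Int)) :=
  match rest with
  | [] => segments ++ [current]
  | cell :: rest =>
    if pvIdx cell 0 == pvIdx ((PySem.List.pyGet? current (-1)).getD []) 0 + 1 then
      pvSegLoop rest segments (current ++ [cell])
    else
      pvSegLoop rest (segments ++ [current]) [cell]

def pvContiguousXSegments (row_cells : List (List Int)) : List (List (List Int)) :=
  match PySem.List.sorted row_cells (fun cell => pvIdx cell 0) with
  | [] => []
  | c0 :: rest => pvSegLoop rest [] [c0]

-- 'for segment in iter_segments: …' with state (lanes, reverse_x)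
def pvEmitA (iter_segments : List (List (List Int)))
    (st : List (List (List Int)) × Bool) : List (List (List Int)) × Bool :=
  iter_segments.foldl (fun st segment =>
    if segment.length < 2 then st
    else (st.1 ++ [if st.2 then segment.reverse else segment], !st.2)) st

def build_bottom_up_xy_lanes_py (coiling_cells : List (List Int)) (row_spacing : Int) :
    List (List (List Int)) :=
  if coiling_cells = [] then []
  else
    let z_levels := PySem.List.sorted
      (PySem.Set.ofList (coiling_cells.map (fun cell => pvIdx cell 2))) (fun z => z)
    let st := z_levels.foldl (fun st z =>
      let layer := coiling_cells.filter (fun cell => pvIdx cell 2 == z)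
      let rows_by_y := layer.foldl
        (fun d cell => d.modify (pvIdx cell 1) [] (· ++ [cell])) PySem.Dict.empty
      let selected_rows := (PySem.List.sorted rows_by_y.keys (fun y => y)).foldl
        (fun sel y =>
          if sel.isEmpty || row_spacing ≤ |y - (PySem.List.pyGet? sel (-1)).getD 0| then
            sel ++ [y]
          else sel) []
      selected_rows.foldl (fun st y =>
        let row_segments := pvContiguousXSegments (rows_by_y.getD y [])
        if row_segments = [] then st
        else
          let iter_segments := if st.2 then row_segments.reverse else row_segments
          pvEmitA iter_segments st) st) ([], false)
    st.1

-- ===== PORT B =====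
-- inner while loop: extend run while the next x is consecutive
def pvGrab (run : List (List Int)) (rest : List (List Int)) :
    List (List Int) × List (List Int) :=
  match rest with
  | [] => (run, [])
  | c :: rest' =>
    if pvIdx c 0 == pvIdx ((PySem.List.pyGet? run (-1)).getD []) 0 + 1 then
      pvGrab (run ++ [c]) rest'
    else (run, c :: rest')

theorem pvGrab_snd_length (run rest) : (pvGrab run rest).2.length ≤ rest.length := by
  induction rest generalizing run with
  | nil => simp [pvGrab]
  | cons c rest ih =>
    simp only [pvGrab]
    split
    · exact Nat.le_trans (ih _) (by simp)
    · simp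

-- outer while loop: peel one maximal run, keep it if len ≥ 2
def pvRuns (rest : List (List Int)) : List (List (List Int)) :=
  match rest with
  | [] => []
  | c :: rest' =>
    let p := pvGrab [c] rest'
    (if 2 ≤ p.1.length then [p.1] else []) ++ pvRuns p.2
termination_by rest.length
decreasing_by
  simpa using Nat.lt_succ_of_le (pvGrab_snd_length [c] rest')

-- 'for run in runs: lanes.append(…); reverse_x = not reverse_x'
def pvEmitB (runs : List (List (List Int)))
    (st : List (List (List Int)) × Bool) : List (List (List Int)) × Bool :=
  runs.foldl (fun st run => (st.1 ++ [if st.2 then run.reverse else run], !st.2)) st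

-- body executed for a selected row y (everything after the 'continue')
def pvRowB (bucket : List (List Int))
    (st : List (List (List Int)) × Bool) : List (List (List Int)) × Bool :=
  let ordered := PySem.List.sorted bucket (fun c => pvIdx c 0)
  let runs := pvRuns ordered
  let runs' := if st.2 then runs.reverse else runs
  pvEmitB runs' st

def build_bottom_up_xy_lanes_py_alt (coiling_cells : List (List Int)) (row_spacing : Int) :
    List (List (List Int)) :=
  let by_z := coiling_cells.foldl
    (fun d cell => d.modify (pvIdx cell 2) [] (· ++ [cell])) PySem.Dict.empty
  let st := (PySem.List.sorted by_z.keys (fun z => z)).foldl (fun st z =>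
    let by_y := (by_z.getD z []).foldl
      (fun d cell => d.modify (pvIdx cell 1) [] (· ++ [cell])) PySem.Dict.empty
    let s := (PySem.List.sorted by_y.keys (fun y => y)).foldl
      (fun s y =>
        match s.2 with
        | some ly => if |y - ly| < row_spacing then s else (pvRowB (by_y.getD y []) s.1, some y)
        | none => (pvRowB (by_y.getD y []) s.1, some y))
      (st, (none : Option Int))
    s.1) (([], false) : List (List (List Int)) × Bool)
  st.1

-- ===== PRECONDITION & SPEC =====
-- Pre_ excludes (a) inputs containing a cell with fewer than 3 coordinates, on which A raises
-- IndexError, and (b) inputs with two cells agreeing on their first three coordinates, where the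
-- relative output order of such tied cells follows Python's accidental hash/set-iteration order
-- (A's input is a Python set), so neither order is specified.
def Pre_build_bottom_up_xy_lanes_py (coiling_cells : List (List Int)) (row_spacing : Int) : Prop :=
  (∀ c ∈ coiling_cells, 3 ≤ c.length) ∧ (coiling_cells.map (fun c => c.take 3)).Nodup
instance (coiling_cells : List (List Int)) (row_spacing : Int) :
    Decidable (Pre_build_bottom_up_xy_lanes_py coiling_cells row_spacing) := by
  unfold Pre_build_bottom_up_xy_lanes_py; infer_instance

def pvWitness_build_bottom_up_xy_lanes_py : List (List Int) × Int :=
  ([[0, 0, 0], [1, 0, 0], [0, 2, 0], [1, 2, 0], [0, 0, 1]], 2)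

def Spec_build_bottom_up_xy_lanes_py (coiling_cells : List (List Int)) (row_spacing : Int)
    (out : List (List (List Int))) : Prop :=
  out = build_bottom_up_xy_lanes_py_alt coiling_cells row_spacing
instance (coiling_cells : List (List Int)) (row_spacing : Int) (out : List (List (List Int))) :
    Decidable (Spec_build_bottom_up_xy_lanes_py coiling_cells row_spacing out) := by
  unfold Spec_build_bottom_up_xy_lanes_py; infer_instance

-- ===== CLAIM (what is proved, stated in full; the proofs are below) =====
def Claim_equal_build_bottom_up_xy_lanes_py : Prop :=
  ∀ (coiling_cells : List (List Int)) (row_spacing : Int),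
    Dom_build_bottom_up_xy_lanes_py coiling_cells row_spacing →
    Pre_build_bottom_up_xy_lanes_py coiling_cells row_spacing →
    Spec_build_bottom_up_xy_lanes_py coiling_cells row_spacing
      (build_bottom_up_xy_lanes_py coiling_cells row_spacing)

-- ===== LEMMAS AND PROOFS =====

-- A's segment list, in its natural run-peeling form (proof-side mediator)
def pvSegList (rest : List (List Int)) : List (List (List Int)) :=
  match rest with
  | [] => []
  | c :: rest' =>
    let p := pvGrab [c] rest'
    p.1 :: pvSegList p.2
termination_by rest.length
decreasing_by
  simpa using Nat.lt_succ_of_le (pvGrab_snd_length [c] rest')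

theorem pvSegLoop_eq (rest : List (List Int)) (segments : List (List (List Int)))
    (current : List (List Int)) :
    pvSegLoop rest segments current =
      segments ++ (pvGrab current rest).1 :: pvSegList (pvGrab current rest).2 := by
  induction rest generalizing segments current with
  | nil => simp [pvSegLoop, pvGrab, pvSegList]
  | cons c rest ih =>
    rw [pvSegLoop, pvGrab]
    split
    · rw [ih]
    · rw [ih, pvSegList]
      simp

theorem pvContig_eq (row : List (List Int)) :
    pvContiguousXSegments row = pvSegList (PySem.List.sorted row (fun c => pvIdx c 0)) := by
  rw [pvContiguousXSegments]
  cases h : PySem.List.sorted row (fun c => pvIdx c 0) with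
  | nil => rw [pvSegList]
  | cons c0 rest =>
    show pvSegLoop rest [] [c0] = pvSegList (c0 :: rest)
    rw [pvSegLoop_eq, pvSegList]
    simp

theorem pvRuns_eq (l : List (List Int)) :
    pvRuns l = (pvSegList l).filter (fun s => 2 ≤ s.length) := by
  match l with
  | [] => simp [pvRuns, pvSegList]
  | c :: rest' =>
    rw [pvRuns, pvSegList]
    simp only [List.filter_cons]
    rw [pvRuns_eq (pvGrab [c] rest').2]
    by_cases h : 2 ≤ (pvGrab [c] rest').1.length <;> simp [h]
termination_by l.length
decreasing_by simpa using Nat.lt_succ_of_le (pvGrab_snd_length [c] rest')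

theorem pvEmitA_eq (segs : List (List (List Int))) (st : List (List (List Int)) × Bool) :
    pvEmitA segs st = pvEmitB (segs.filter (fun s => 2 ≤ s.length)) st := by
  induction segs generalizing st with
  | nil => rfl
  | cons s segs ih =>
    by_cases h : s.length < 2
    · have ha : pvEmitA (s :: segs) st = pvEmitA segs st := by
        rw [pvEmitA, pvEmitA, List.foldl_cons, if_pos h]
      rw [ha, List.filter_cons, if_neg (by simpa using h), ih]
    · have h' : decide (2 ≤ s.length) = true := by simpa using h
      have ha : pvEmitA (s :: segs) st
          = pvEmitA segs (st.1 ++ [if st.2 then s.reverse else s], !st.2) := by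
        rw [pvEmitA, pvEmitA, List.foldl_cons, if_neg h]
      rw [ha, ih, List.filter_cons, h']
      rfl

-- per-row: A's segment/skip/reverse emission equals pvRowB
theorem pvRow_eq (bucket : List (List Int)) (st : List (List (List Int)) × Bool) :
    (let row_segments := pvContiguousXSegments bucket
     if row_segments = [] then st
     else
       let iter_segments := if st.2 then row_segments.reverse else row_segments
       pvEmitA iter_segments st) = pvRowB bucket st := by
  simp only [pvRowB, pvContig_eq, pvRuns_eq]
  by_cases hd : pvSegList (PySem.List.sorted bucket (fun c => pvIdx c 0)) = []
  · simp [hd, pvEmitB]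
  · rw [if_neg hd]
    obtain ⟨lanes, rev⟩ := st
    cases rev
    · simp only [Bool.false_eq_true, if_false]
      exact pvEmitA_eq _ _
    · simp only [if_true]
      rw [pvEmitA_eq, List.filter_reverse]

-- the grouping dict 'd.setdefault(k(c), []).append(c)' built over l
def pvGroupD (l : List (List Int)) (k : List Int → Int) : PySem.Dict Int (List (List Int)) :=
  l.foldl (fun d cell => d.modify (k cell) [] (· ++ [cell])) PySem.Dict.empty

-- grouping: value of the z-(or y-)grouping dict at a key is the filter
theorem pvGroup_getD (l : List (List Int)) (k : List Int → Int) (z : Int) :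
    (pvGroupD l k).getD z [] = l.filter (fun c => k c == z) := by
  have h1 : pvGroupD l k
      = (l.map (fun c => (k c, c))).foldl
          (fun d p => d.modify p.1 [] (· ++ [p.2])) PySem.Dict.empty := by
    rw [pvGroupD, List.foldl_map]
  rw [h1, PySem.Dict.getD_foldl_modify_append]
  simp [List.filter_map, Function.comp_def]

theorem pvGroup_keys (l : List (List Int)) (k : List Int → Int) :
    (pvGroupD l k).keys = PySem.Set.ofList (l.map k) := by
  rw [pvGroupD, PySem.Dict.keys_foldl_modify_key]
  simp [PySem.Set.update, PySem.Set.ofList_eq_foldl]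

-- fused selection (proof-side mediator): the list of selected rows, threading the last pick
def pvSel (last : Option Int) (sp : Int) : List Int → List Int
  | [] => []
  | y :: ys =>
    match last with
    | none => y :: pvSel (some y) sp ys
    | some l => if |y - l| < sp then pvSel (some l) sp ys else y :: pvSel (some y) sp ys

theorem pvSelA_eq (sp : Int) (ys : List Int) (sel : List Int) :
    ys.foldl (fun sel y =>
        if sel.isEmpty || sp ≤ |y - (PySem.List.pyGet? sel (-1)).getD 0| then sel ++ [y]
        else sel) sel
      = sel ++ pvSel sel.getLast? sp ys := by
  induction ys generalizing sel with
  | nil => simp [pvSel]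
  | cons y ys ih =>
    rw [List.foldl_cons]
    by_cases hs : sel = []
    · subst hs
      simp only [List.isEmpty_nil, Bool.true_or, if_true, List.nil_append]
      rw [ih]
      simp [pvSel]
    · obtain ⟨l, hl⟩ := Option.isSome_iff_exists.mp (List.getLast?_isSome.mpr hs)
      rw [hl]
      have hsimp : (sel.isEmpty || decide (sp ≤ |y - (PySem.List.pyGet? sel (-1)).getD 0|))
          = decide (sp ≤ |y - l|) := by
        rw [PySem.List.pyGet?_neg_one, hl]
        have he : sel.isEmpty = false := by simp [hs]
        rw [he, Bool.false_or, Option.getD_some]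
      by_cases hc : sp ≤ |y - l|
      · rw [if_pos (by simp [hsimp, hc]), ih, List.getLast?_concat, pvSel]
        rw [if_neg (by omega)]
        simp
      · rw [if_neg (by simp [hsimp, hc]), ih, hl, pvSel]
        rw [if_pos (by omega)]

theorem pvSelB_eq (sp : Int) (bucket : Int → List (List Int)) (ys : List Int)
    (st : List (List (List Int)) × Bool) (last : Option Int) :
    (ys.foldl (fun s y =>
        match s.2 with
        | some ly => if |y - ly| < sp then s else (pvRowB (bucket y) s.1, some y)
        | none => (pvRowB (bucket y) s.1, some y)) (st, last)).1
      = (pvSel last sp ys).foldl (fun st y => pvRowB (bucket y) st) st := by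
  induction ys generalizing st last with
  | nil => simp [pvSel]
  | cons y ys ih =>
    rw [List.foldl_cons]
    cases last with
    | none =>
      rw [pvSel, List.foldl_cons]
      exact ih _ _
    | some l =>
      rw [pvSel]
      by_cases hc : |y - l| < sp
      · simp only [if_pos hc]
        exact ih _ _
      · simp only [if_neg hc, List.foldl_cons]
        exact ih _ _

-- A's per-z body, as a named step function (proof-side; definitionally the port's lambda)
def pvZStepA (coiling_cells : List (List Int)) (row_spacing : Int)
    (st : List (List (List Int)) × Bool) (z : Int) : List (List (List Int)) × Bool :=
  let layer := coiling_cells.filter (fun cell => pvIdx cell 2 == z)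
  let rows_by_y := layer.foldl
    (fun d cell => d.modify (pvIdx cell 1) [] (· ++ [cell])) PySem.Dict.empty
  let selected_rows := (PySem.List.sorted rows_by_y.keys (fun y => y)).foldl
    (fun sel y =>
      if sel.isEmpty || row_spacing ≤ |y - (PySem.List.pyGet? sel (-1)).getD 0| then
        sel ++ [y]
      else sel) []
  selected_rows.foldl (fun st y =>
    let row_segments := pvContiguousXSegments (rows_by_y.getD y [])
    if row_segments = [] then st
    else
      let iter_segments := if st.2 then row_segments.reverse else row_segments
      pvEmitA iter_segments st) st

-- B's per-z body, as a named step function (proof-side; definitionally the port's lambda)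
def pvZStepB (by_z : PySem.Dict Int (List (List Int))) (row_spacing : Int)
    (st : List (List (List Int)) × Bool) (z : Int) : List (List (List Int)) × Bool :=
  let by_y := (by_z.getD z []).foldl
    (fun d cell => d.modify (pvIdx cell 1) [] (· ++ [cell])) PySem.Dict.empty
  let s := (PySem.List.sorted by_y.keys (fun y => y)).foldl
    (fun s y =>
      match s.2 with
      | some ly => if |y - ly| < row_spacing then s else (pvRowB (by_y.getD y []) s.1, some y)
      | none => (pvRowB (by_y.getD y []) s.1, some y))
    (st, (none : Option Int))
  s.1

theorem portA_eq (coiling_cells : List (List Int)) (row_spacing : Int)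
    (h : coiling_cells ≠ []) :
    build_bottom_up_xy_lanes_py coiling_cells row_spacing
      = ((PySem.List.sorted
            (PySem.Set.ofList (coiling_cells.map (fun cell => pvIdx cell 2))) (fun z => z)).foldl
          (pvZStepA coiling_cells row_spacing) ([], false)).1 := by
  rw [build_bottom_up_xy_lanes_py, if_neg h]
  rfl

theorem portB_eq (coiling_cells : List (List Int)) (row_spacing : Int) :
    build_bottom_up_xy_lanes_py_alt coiling_cells row_spacing
      = ((PySem.List.sorted (pvGroupD coiling_cells (fun c => pvIdx c 2)).keys (fun z => z)).foldl
          (pvZStepB (pvGroupD coiling_cells (fun c => pvIdx c 2)) row_spacing) ([], false)).1 := rfl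

theorem pvZStep_eq (coiling_cells : List (List Int)) (row_spacing : Int)
    (st : List (List (List Int)) × Bool) (z : Int) :
    pvZStepA coiling_cells row_spacing st z
      = pvZStepB (pvGroupD coiling_cells (fun c => pvIdx c 2)) row_spacing st z := by
  simp only [pvZStepA, pvZStepB]
  rw [pvGroup_getD]
  rw [show ∀ l : List (List Int),
        l.foldl (fun d cell => d.modify (pvIdx cell 1) [] (· ++ [cell])) PySem.Dict.empty
          = pvGroupD l (fun c => pvIdx c 1) from fun _ => rfl]
  rw [pvSelB_eq row_spacing
        (fun y => (pvGroupD (coiling_cells.filter (fun cell => pvIdx cell 2 == z))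
          (fun c => pvIdx c 1)).getD y [])]
  rw [pvSelA_eq]
  simp only [List.getLast?_nil, List.nil_append]
  apply PySem.List.foldl_congr_mem
  intro acc y _
  exact pvRow_eq _ acc

-- ===== VERDICT (by name: the statement is the Claim_ definition above) =====
theorem build_bottom_up_xy_lanes_py_spec : Claim_equal_build_bottom_up_xy_lanes_py := by
  intro coiling_cells row_spacing _ _
  unfold Spec_build_bottom_up_xy_lanes_py
  by_cases hc : coiling_cells = []
  · subst hc; rfl
  · rw [portA_eq coiling_cells row_spacing hc, portB_eq, pvGroup_keys]
    congr 1
    apply PySem.List.foldl_congr_mem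
    intro acc z _
    exact pvZStep_eq coiling_cells row_spacing acc z
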